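-- pv_equiv track=rewrite | github.com/bakkerjarr/ACLSwitch | Ryu_Application/aclswitch/json_templates.py | check_rule_creation_json
-- ===== SOURCE A (Python) =====
-- _JSON_RULE_CREATE = ("ip_src", "ip_dst", "tp_proto", "port_src",
--                      "port_dst", "policy", "action", "time_enforce")
--
-- def check_rule_creation_json(rule):
--     """Check that rule creation JSON is formatted correctly.
--
--     :param rule: Rule JSON to check.
--     :return: True if valid, False otherwise.
--     """
--     for key in _JSON_RULE_CREATE:
--         if key not in rule.keys():
--             if (key == "time_enforce" and len(rule) == len(
--                     _JSON_RULE_CREATE)-1):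
--                 return True
--             return False
--     if len(rule) == len(_JSON_RULE_CREATE):
--         if len(rule["time_enforce"]) != 2:
--             return False
--         return True
--     return False
-- ===== SOURCE B (Python) =====
-- _JSON_RULE_CREATE = ("ip_src", "ip_dst", "tp_proto", "port_src",
--                      "port_dst", "policy", "action", "time_enforce")
--
-- def check_rule_creation_json(rule):
--     """Set-based validation: compare the key set against the required set."""
--     keys = set(rule.keys())
--     required = set(_JSON_RULE_CREATE)
--     if keys == required:
--         return len(rule["time_enforce"]) == 2
--     if keys == required - {"time_enforce"}:
--         return True
--     return False
-- ===== Notes on version B (the rewrite author's own statement) =====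
-- stated objective: simpler
-- what changed: Replaces the ordered loop over required keys with its early-exit special case for 'time_enforce' by two whole-set equality comparisons of the rule's key set against the required set (and the required set minus 'time_enforce').
import Mathlib
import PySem

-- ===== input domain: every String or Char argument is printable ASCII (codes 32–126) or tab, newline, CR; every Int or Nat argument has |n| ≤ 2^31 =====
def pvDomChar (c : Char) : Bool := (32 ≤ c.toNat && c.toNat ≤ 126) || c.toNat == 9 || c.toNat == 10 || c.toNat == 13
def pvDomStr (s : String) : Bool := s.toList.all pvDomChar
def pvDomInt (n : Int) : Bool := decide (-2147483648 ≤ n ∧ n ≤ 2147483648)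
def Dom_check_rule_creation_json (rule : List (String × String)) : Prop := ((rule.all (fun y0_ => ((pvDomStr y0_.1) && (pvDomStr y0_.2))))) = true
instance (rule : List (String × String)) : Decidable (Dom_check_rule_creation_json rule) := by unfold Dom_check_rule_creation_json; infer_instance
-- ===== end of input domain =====

-- B replaces A's ordered loop over the required keys (with its early-exit special case for
-- "time_enforce") by two whole-set equality comparisons of the key set; objective: simpler.

-- ===== PORT A =====
-- the module constant _JSON_RULE_CREATE
def pvJsonRuleCreate : List String :=
  ["ip_src", "ip_dst", "tp_proto", "port_src", "port_dst", "policy", "action", "time_enforce"]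

-- the 'for key in _JSON_RULE_CREATE' loop; the fall-through block after the loop is the [] case.
-- rule["time_enforce"] there is ported as getD with "": exact, because that block only runs after
-- the loop has verified every required key (in particular "time_enforce") is present.
def pvRuleLoopA (d : PySem.Dict String String) : List String → Bool
  | [] =>
      if d.size = pvJsonRuleCreate.length then
        if PySem.Str.len (d.getD "time_enforce" "") ≠ 2 then false else true
      else false
  | key :: rest =>
      if d.contains key then pvRuleLoopA d rest
      else if key == "time_enforce" && d.size == pvJsonRuleCreate.length - 1 then true
      else false

def check_rule_creation_json (rule : List (String × String)) : Bool :=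
  pvRuleLoopA (PySem.Dict.ofList rule) pvJsonRuleCreate

-- ===== PORT B =====
-- rule["time_enforce"] in the first branch is ported as getD with "": exact, because that branch
-- only runs when the key set equals the required set, so "time_enforce" is present.
def check_rule_creation_json_alt (rule : List (String × String)) : Bool :=
  let d := PySem.Dict.ofList rule
  let keys : PySem.Set String := PySem.Set.ofList d.keys
  let required : PySem.Set String := PySem.Set.ofList pvJsonRuleCreate
  if PySem.Set.equal keys required then
    PySem.Str.len (d.getD "time_enforce" "") == 2
  else if PySem.Set.equal keys (PySem.Set.diff required (PySem.Set.ofList ["time_enforce"])) then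
    true
  else false

-- ===== PRECONDITION & SPEC =====
def Spec_check_rule_creation_json (rule : List (String × String)) (out : Bool) : Prop := out = check_rule_creation_json_alt rule
instance (rule : List (String × String)) (out : Bool) : Decidable (Spec_check_rule_creation_json rule out) := by unfold Spec_check_rule_creation_json; infer_instance

-- ===== CLAIM (what is proved, stated in full; the proofs are below) =====
def Claim_equal_check_rule_creation_json : Prop := ∀ (rule : List (String × String)), Dom_check_rule_creation_json rule → Spec_check_rule_creation_json rule (check_rule_creation_json rule)

-- ===== LEMMAS AND PROOFS =====

-- the required keys minus "time_enforce" (proof-only abbreviation)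
def pvReq7 : List String :=
  ["ip_src", "ip_dst", "tp_proto", "port_src", "port_dst", "policy", "action"]

theorem pvDiff_eq :
    PySem.Set.diff (PySem.Set.ofList pvJsonRuleCreate) (PySem.Set.ofList ["time_enforce"]) = PySem.Set.ofList pvReq7 := by
  decide

theorem pvEqual_iff (K R : List String) :
    PySem.Set.equal (PySem.Set.ofList K) (PySem.Set.ofList R) = true ↔
      ((∀ x ∈ K, x ∈ R) ∧ (∀ x ∈ R, x ∈ K)) := by
  simp [PySem.Set.equal, PySem.Set.issubset, List.all_eq_true, PySem.Set.mem_ofList]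

theorem pvPerm (K R : List String) (hR : R.Nodup) (hs : ∀ x ∈ R, x ∈ K)
    (hl : K.length = R.length) : K.Perm R := by
  have h1 : List.Subperm R K := hR.subperm hs
  exact (h1.perm_of_length_le (le_of_eq hl)).symm

theorem pvEqual_of_perm (K R : List String) (h : K.Perm R) :
    PySem.Set.equal (PySem.Set.ofList K) (PySem.Set.ofList R) = true := by
  rw [pvEqual_iff]
  exact ⟨fun x hx => h.mem_iff.1 hx, fun x hx => h.mem_iff.2 hx⟩

theorem pvLen_eq_of_equal (K R : List String) (hK : K.Nodup) (hR : R.Nodup)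
    (h : PySem.Set.equal (PySem.Set.ofList K) (PySem.Set.ofList R) = true) :
    K.length = R.length := by
  rw [pvEqual_iff] at h
  exact le_antisymm ((hK.subperm h.1).length_le) ((hR.subperm h.2).length_le)

theorem pvSize_eq (d : PySem.Dict String String) : d.size = d.keys.length := by
  simp [PySem.Dict.size, PySem.Dict.keys]

-- the right-hand side of the equivalence, abstracted over the dict
def pvRhs (d : PySem.Dict String String) : Bool :=
  if PySem.Set.equal (PySem.Set.ofList d.keys) (PySem.Set.ofList pvJsonRuleCreate) then
    PySem.Str.len (d.getD "time_enforce" "") == 2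
  else if PySem.Set.equal (PySem.Set.ofList d.keys)
      (PySem.Set.diff (PySem.Set.ofList pvJsonRuleCreate) (PySem.Set.ofList ["time_enforce"])) then
    true
  else false

-- B returns False whenever one of the seven always-required keys is missing
theorem pvRhs_false (d : PySem.Dict String String) (k : String)
    (hk : k ∈ pvReq7) (hnk : k ∉ d.keys) : pvRhs d = false := by
  have hk8 : k ∈ pvJsonRuleCreate := by
    have : ∀ x ∈ pvReq7, x ∈ pvJsonRuleCreate := by decide
    exact this k hk
  have h1 : ¬ PySem.Set.equal (PySem.Set.ofList d.keys) (PySem.Set.ofList pvJsonRuleCreate) = true := by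
    intro h; exact hnk (((pvEqual_iff _ _).1 h).2 k hk8)
  have h2 : ¬ PySem.Set.equal (PySem.Set.ofList d.keys)
      (PySem.Set.diff (PySem.Set.ofList pvJsonRuleCreate) (PySem.Set.ofList ["time_enforce"])) = true := by
    rw [pvDiff_eq]
    intro h; exact hnk (((pvEqual_iff _ _).1 h).2 k hk)
  rw [pvRhs, if_neg h1, if_neg h2]

theorem pvMain (d : PySem.Dict String String) (hn : d.keys.Nodup) :
    pvRuleLoopA d pvJsonRuleCreate = pvRhs d := by
  have hsz := pvSize_eq d
  by_cases h1 : "ip_src" ∈ d.keys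
  case neg =>
    have hc : d.contains "ip_src" = false := by
      rw [← Bool.not_eq_true, PySem.Dict.contains_iff_mem_keys]; exact h1
    rw [pvRhs_false d _ (by decide) h1]
    simp [pvJsonRuleCreate, pvRuleLoopA, hc]
  by_cases h2 : "ip_dst" ∈ d.keys
  case neg =>
    have hc : d.contains "ip_dst" = false := by
      rw [← Bool.not_eq_true, PySem.Dict.contains_iff_mem_keys]; exact h2
    rw [pvRhs_false d _ (by decide) h2]
    simp [pvJsonRuleCreate, pvRuleLoopA, hc, PySem.Dict.contains_iff_mem_keys, h1]
  by_cases h3 : "tp_proto" ∈ d.keys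
  case neg =>
    have hc : d.contains "tp_proto" = false := by
      rw [← Bool.not_eq_true, PySem.Dict.contains_iff_mem_keys]; exact h3
    rw [pvRhs_false d _ (by decide) h3]
    simp [pvJsonRuleCreate, pvRuleLoopA, hc, PySem.Dict.contains_iff_mem_keys, h1, h2]
  by_cases h4 : "port_src" ∈ d.keys
  case neg =>
    have hc : d.contains "port_src" = false := by
      rw [← Bool.not_eq_true, PySem.Dict.contains_iff_mem_keys]; exact h4
    rw [pvRhs_false d _ (by decide) h4]
    simp [pvJsonRuleCreate, pvRuleLoopA, hc, PySem.Dict.contains_iff_mem_keys, h1, h2, h3]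
  by_cases h5 : "port_dst" ∈ d.keys
  case neg =>
    have hc : d.contains "port_dst" = false := by
      rw [← Bool.not_eq_true, PySem.Dict.contains_iff_mem_keys]; exact h5
    rw [pvRhs_false d _ (by decide) h5]
    simp [pvJsonRuleCreate, pvRuleLoopA, hc, PySem.Dict.contains_iff_mem_keys, h1, h2, h3, h4]
  by_cases h6 : "policy" ∈ d.keys
  case neg =>
    have hc : d.contains "policy" = false := by
      rw [← Bool.not_eq_true, PySem.Dict.contains_iff_mem_keys]; exact h6
    rw [pvRhs_false d _ (by decide) h6]
    simp [pvJsonRuleCreate, pvRuleLoopA, hc, PySem.Dict.contains_iff_mem_keys, h1, h2, h3, h4, h5]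
  by_cases h7 : "action" ∈ d.keys
  case neg =>
    have hc : d.contains "action" = false := by
      rw [← Bool.not_eq_true, PySem.Dict.contains_iff_mem_keys]; exact h7
    rw [pvRhs_false d _ (by decide) h7]
    simp [pvJsonRuleCreate, pvRuleLoopA, hc, PySem.Dict.contains_iff_mem_keys, h1, h2, h3, h4, h5, h6]
  by_cases h8 : "time_enforce" ∈ d.keys
  · -- all eight required keys are present
    by_cases hlen : d.keys.length = 8
    · -- exactly the required keys: both sides check the length of rule["time_enforce"]
      have hperm : d.keys.Perm pvJsonRuleCreate := by
        apply pvPerm _ _ (by decide) _ hlen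
        intro x hx
        fin_cases hx <;> assumption
      have heq := pvEqual_of_perm _ _ hperm
      rw [pvRhs, if_pos heq]
      simp only [pvJsonRuleCreate, pvRuleLoopA]
      simp [PySem.Dict.contains_iff_mem_keys, h1, h2, h3, h4, h5, h6, h7, h8, hsz, hlen]
      exact Eq.symm (Bool.beq_eq_decide_eq _ 2)
    · -- extra keys beside the required eight: both sides return False
      have hne1 : ¬ PySem.Set.equal (PySem.Set.ofList d.keys) (PySem.Set.ofList pvJsonRuleCreate) = true := by
        intro h; exact hlen (pvLen_eq_of_equal _ _ hn (by decide) h)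
      have hne2 : ¬ PySem.Set.equal (PySem.Set.ofList d.keys)
          (PySem.Set.diff (PySem.Set.ofList pvJsonRuleCreate) (PySem.Set.ofList ["time_enforce"])) = true := by
        rw [pvDiff_eq]
        intro h
        have : "time_enforce" ∈ pvReq7 := ((pvEqual_iff _ _).1 h).1 _ h8
        exact absurd this (by decide)
      rw [pvRhs, if_neg hne1, if_neg hne2]
      simp only [pvJsonRuleCreate, pvRuleLoopA]
      simp [PySem.Dict.contains_iff_mem_keys, h1, h2, h3, h4, h5, h6, h7, h8, hsz, hlen]
  · -- "time_enforce" missing, the other seven present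
    have hne1 : ¬ PySem.Set.equal (PySem.Set.ofList d.keys) (PySem.Set.ofList pvJsonRuleCreate) = true := by
      intro h; exact h8 (((pvEqual_iff _ _).1 h).2 "time_enforce" (by decide))
    by_cases hlen : d.keys.length = 7
    · -- exactly the seven: optional key omitted, both sides return True
      have hperm : d.keys.Perm pvReq7 := by
        apply pvPerm _ _ (by decide) _ hlen
        intro x hx
        fin_cases hx <;> assumption
      have heq2 : PySem.Set.equal (PySem.Set.ofList d.keys)
          (PySem.Set.diff (PySem.Set.ofList pvJsonRuleCreate) (PySem.Set.ofList ["time_enforce"])) = true := by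
        rw [pvDiff_eq]; exact pvEqual_of_perm _ _ hperm
      rw [pvRhs, if_neg hne1, if_pos heq2]
      simp only [pvJsonRuleCreate, pvRuleLoopA]
      simp [PySem.Dict.contains_iff_mem_keys, h1, h2, h3, h4, h5, h6, h7, h8, hsz, hlen]
    · -- wrong key count with "time_enforce" missing: both sides return False
      have hne2 : ¬ PySem.Set.equal (PySem.Set.ofList d.keys)
          (PySem.Set.diff (PySem.Set.ofList pvJsonRuleCreate) (PySem.Set.ofList ["time_enforce"])) = true := by
        rw [pvDiff_eq]
        intro h; exact hlen (pvLen_eq_of_equal _ _ hn (by decide) h)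
      rw [pvRhs, if_neg hne1, if_neg hne2]
      simp only [pvJsonRuleCreate, pvRuleLoopA]
      simp [PySem.Dict.contains_iff_mem_keys, h1, h2, h3, h4, h5, h6, h7, h8, hsz, hlen]

-- ===== VERDICT (by name: the statement is the Claim_ definition above) =====
theorem check_rule_creation_json_spec : Claim_equal_check_rule_creation_json := by
  intro rule _
  unfold Spec_check_rule_creation_json check_rule_creation_json check_rule_creation_json_alt
  rw [pvMain (PySem.Dict.ofList rule) (PySem.Dict.nodup_keys_ofList rule)]
  rfl
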